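-- pv_equiv track=rewrite | github.com/mschudt/welchefolgehack | diarization.py | find_closest_string
-- ===== SOURCE A (Python) =====
-- def find_longest_common_streak(s1, s2):
--     """Find the longest common streak of words between s1 and s2."""
--     words1 = s1.split()
--     words2 = s2.split()
--     m = len(words1)
--     n = len(words2)
--     dp = [[0] * (n + 1) for _ in range(m + 1)]  # Matrix to store lengths of longest common streaks
--     longest_len = 0  # Length of the longest common streak
--
--     for i in range(1, m + 1):
--         for j in range(1, n + 1):
--             if words1[i - 1] == words2[j - 1]:
--                 dp[i][j] = dp[i - 1][j - 1] + 1
--                 longest_len = max(longest_len, dp[i][j])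
--             else:
--                 dp[i][j] = 0
--     return longest_len
--
-- def find_closest_string(target, string_list):
--     """Find the string in the list that contains the longest common streak of words from target."""
--     max_length = -1
--     closest_string = None
--
--     for s in string_list:
--         common_length = find_longest_common_streak(target, s)
--         if common_length > max_length:
--             max_length = common_length
--             closest_string = s
--
--     return closest_string
-- ===== SOURCE B (Python) =====
-- def find_closest_string(target, string_list):
--     """Find the string in the list that contains the longest common streak of words from target."""
--     if not string_list:
--         return None
--     tw = target.split()
--
--     def streak(s):
--         # brute force: for every pair of end positions, walk the two reversed
--         # prefixes and count how many words match; keep the maximum run length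
--         w2 = s.split()
--         best = 0
--         for i in range(len(tw)):
--             for j in range(len(w2)):
--                 a = tw[i::-1]
--                 b = w2[j::-1]
--                 k = 0
--                 while k < len(a) and k < len(b) and a[k] == b[k]:
--                     k += 1
--                 if best < k:
--                     best = k
--         return best
--
--     return max(string_list, key=streak)
-- ===== Notes on version B (the rewrite author's own statement) =====
-- stated objective: alternative
-- what changed: B drops A's (m+1)x(n+1) DP table entirely: for each pair of word end-positions it counts the matching run directly by walking the reversed prefixes, and picks the winner with Python's built-in max(key=...) instead of A's manual argmax loop.
import Mathlib
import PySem

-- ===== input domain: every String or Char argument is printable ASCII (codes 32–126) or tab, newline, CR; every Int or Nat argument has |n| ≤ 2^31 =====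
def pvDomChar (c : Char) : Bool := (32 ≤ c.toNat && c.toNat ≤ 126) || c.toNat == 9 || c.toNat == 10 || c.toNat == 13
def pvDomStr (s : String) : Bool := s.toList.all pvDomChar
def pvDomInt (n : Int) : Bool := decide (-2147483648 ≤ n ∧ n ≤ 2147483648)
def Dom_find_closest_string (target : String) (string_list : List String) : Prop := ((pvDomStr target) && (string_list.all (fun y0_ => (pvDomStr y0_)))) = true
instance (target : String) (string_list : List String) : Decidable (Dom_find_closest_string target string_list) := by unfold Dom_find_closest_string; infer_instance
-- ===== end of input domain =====

-- B drops A's DP table: it counts each run directly from its end positions and picks the winner max(key=...)-style; return values proved equal on all inputs.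

-- ===== PORT A =====
-- body of the inner `for j` loop of find_longest_common_streak (j shifted to 0-based: Python's j is j+1 here)
def pvInner (words1 words2 : List String) (i : Nat) (st : List (List Int) × Int) (j : Nat) : List (List Int) × Int :=
  if words1.getD i "" == words2.getD j "" then
    let v := (st.1.getD i []).getD j 0 + 1
    (st.1.set (i+1) ((st.1.getD (i+1) []).set (j+1) v), max st.2 v)
  else
    (st.1.set (i+1) ((st.1.getD (i+1) []).set (j+1) 0), st.2)

-- body of the outer `for i` loop: run the inner loop over all j
def pvOuter (words1 words2 : List String) (st : List (List Int) × Int) (i : Nat) : List (List Int) × Int :=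
  (List.range words2.length).foldl (pvInner words1 words2 i) st

def find_longest_common_streak (s1 s2 : String) : Int :=
  let words1 := PySem.Str.split₀ s1
  let words2 := PySem.Str.split₀ s2
  let m := words1.length
  let n := words2.length
  ((List.range m).foldl (pvOuter words1 words2)
    (List.replicate (m+1) (List.replicate (n+1) (0 : Int)), 0)).2

-- loop body of find_closest_string: state is (max_length, closest_string)
def pvBest (target : String) (st : Int × Option String) (s : String) : Int × Option String :=
  let c := find_longest_common_streak target s
  if st.1 < c then (c, some s) else st

def find_closest_string (target : String) (string_list : List String) : Option String :=
  (string_list.foldl (pvBest target) (-1, none)).2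

-- ===== PORT B =====
-- B's while loop: count matching leading words of the two (already reversed) prefixes
def pvCpl : List String → List String → Int
  | a :: as, b :: bs => if a == b then pvCpl as bs + 1 else 0
  | _, _ => 0

-- B's streak(s): for each pair of end positions, count the run ending there (tw[i::-1] = reverse of take (i+1))
def pvStreak (tw : List String) (s : String) : Int :=
  let w2 := PySem.Str.split₀ s
  (List.range tw.length).foldl (fun best i =>
    (List.range w2.length).foldl (fun best j =>
      let k := pvCpl ((tw.take (i+1)).reverse) ((w2.take (j+1)).reverse)
      if best < k then k else best) best) 0

-- max(string_list, key=streak): first element with strictly greatest key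
def pvMaxKey (tw : List String) (best s : String) : String :=
  if pvStreak tw best < pvStreak tw s then s else best

def find_closest_string_alt (target : String) (string_list : List String) : Option String :=
  match string_list with
  | [] => none
  | x :: xs => some (xs.foldl (pvMaxKey (PySem.Str.split₀ target)) x)

-- ===== PRECONDITION & SPEC =====
def Spec_find_closest_string (target : String) (string_list : List String) (out : Option String) : Prop := out = find_closest_string_alt target string_list
instance (target : String) (string_list : List String) (out : Option String) : Decidable (Spec_find_closest_string target string_list out) := by unfold Spec_find_closest_string; infer_instance

-- ===== CLAIM (what is proved, stated in full; the proofs are below) =====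
def Claim_equal_find_closest_string : Prop := ∀ (target : String) (string_list : List String), Dom_find_closest_string target string_list → Spec_find_closest_string target string_list (find_closest_string target string_list)

-- ===== LEMMAS AND PROOFS =====

-- pvD w1 w2 i j = length of the common word run ending exactly at prefix lengths i, j; A's dp[i][j] holds exactly this value
def pvD (w1 w2 : List String) (i j : Nat) : Int :=
  pvCpl ((w1.take i).reverse) ((w2.take j).reverse)

def pvZrow (w2 : List String) : List Int := List.replicate (w2.length + 1) 0

def pvRowD (w1 w2 : List String) (i : Nat) : List Int :=
  (List.range (w2.length + 1)).map (pvD w1 w2 i)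

-- row i+1 of the dp matrix, filled up to column k
def pvProw (w1 w2 : List String) (i k : Nat) : List Int :=
  (List.range (w2.length + 1)).map (fun j => if 1 ≤ j ∧ j ≤ k then pvD w1 w2 (i+1) j else 0)

-- matrix state inside row i's inner loop after k inner iterations
def pvMpart (w1 w2 : List String) (i k : Nat) : List (List Int) :=
  (List.range (i+1)).map (pvRowD w1 w2) ++ pvProw w1 w2 i k :: List.replicate (w1.length - i - 1) (pvZrow w2)

-- matrix state after r complete rows
def pvMfull (w1 w2 : List String) (r : Nat) : List (List Int) :=
  (List.range (r+1)).map (pvRowD w1 w2) ++ List.replicate (w1.length - r) (pvZrow w2)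

lemma pvD_zero_left (w1 w2 : List String) (j : Nat) : pvD w1 w2 0 j = 0 := by
  simp [pvD]
  cases ((w2.take j).reverse) <;> simp [pvCpl]

lemma pvD_zero_right (w1 w2 : List String) (i : Nat) : pvD w1 w2 i 0 = 0 := by
  simp [pvD]
  cases ((w1.take i).reverse) <;> simp [pvCpl]

-- the DP recurrence satisfied by pvD
lemma pvD_succ (w1 w2 : List String) (i j : Nat) (hi : i < w1.length) (hj : j < w2.length) :
    pvD w1 w2 (i+1) (j+1) =
      if w1.getD i "" == w2.getD j "" then pvD w1 w2 i j + 1 else 0 := by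
  unfold pvD
  have e1 : List.take (i+1) w1 = List.take i w1 ++ [w1[i]] := by
    rw [List.take_succ, List.getElem?_eq_getElem hi]; rfl
  have e2 : List.take (j+1) w2 = List.take j w2 ++ [w2[j]] := by
    rw [List.take_succ, List.getElem?_eq_getElem hj]; rfl
  rw [e1, e2, List.reverse_append, List.reverse_append]
  simp only [List.reverse_singleton, List.singleton_append, pvCpl,
    List.getD_eq_getElem _ _ hi, List.getD_eq_getElem _ _ hj]

lemma pv_getD_append {α : Type} (xs ys : List α) (k : Nat) (hk : k < xs.length) (d : α) :
    (xs ++ ys).getD k d = xs.getD k d := by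
  rw [List.getD_eq_getElem _ _ (by simp; omega), List.getD_eq_getElem _ _ hk,
    List.getElem_append_left hk]

lemma pv_getD_append_length {α : Type} (xs : List α) (y : α) (zs : List α) (d : α) :
    (xs ++ y :: zs).getD xs.length d = y := by
  induction xs with
  | nil => rfl
  | cons a l ih => simpa using ih

lemma pv_set_append {α : Type} (xs : List α) (y v : α) (zs : List α) :
    (xs ++ y :: zs).set xs.length v = xs ++ v :: zs := by
  induction xs with
  | nil => rfl
  | cons a l ih => simp [ih]

lemma pv_getD_append_at {α : Type} (xs : List α) (y : α) (zs : List α) (d : α) (k : Nat)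
    (hk : k = xs.length) : (xs ++ y :: zs).getD k d = y := by
  subst hk; exact pv_getD_append_length xs y zs d

lemma pv_set_append_at {α : Type} (xs : List α) (y v : α) (zs : List α) (k : Nat)
    (hk : k = xs.length) : (xs ++ y :: zs).set k v = xs ++ v :: zs := by
  subst hk; exact pv_set_append xs y v zs

lemma pv_getD_map_range {α : Type} (f : Nat → α) (n k : Nat) (hk : k < n) (d : α) :
    ((List.range n).map f).getD k d = f k := by
  rw [List.getD_eq_getElem _ _ (by simpa using hk)]
  simp

lemma pv_set_map_range {α : Type} (f : Nat → α) (n k : Nat) (v : α) :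
    ((List.range n).map f).set k v = (List.range n).map (fun j => if j = k then v else f j) := by
  apply List.ext_getElem
  · simp
  · intro i h1 h2
    simp only [List.getElem_set, List.getElem_map, List.getElem_range]
    split
    · simp_all
    · rw [if_neg (fun h => by simp_all)]

lemma pvProw_zero (w1 w2 : List String) (i : Nat) : pvProw w1 w2 i 0 = pvZrow w2 := by
  unfold pvProw pvZrow
  rw [List.eq_replicate_iff]
  constructor
  · simp
  · intro b hb
    simp only [List.mem_map] at hb
    obtain ⟨j, _, rfl⟩ := hb
    rw [if_neg (by omega)]

lemma pvProw_full (w1 w2 : List String) (i : Nat) : pvProw w1 w2 i w2.length = pvRowD w1 w2 (i+1) := by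
  unfold pvProw pvRowD
  apply List.map_congr_left
  intro j hj
  simp only [List.mem_range] at hj
  by_cases h1 : 1 ≤ j
  · rw [if_pos ⟨h1, by omega⟩]
  · have : j = 0 := by omega
    subst this
    simp [pvD_zero_right]

lemma pvMfull_eq_Mpart (w1 w2 : List String) (r : Nat) (hr : r < w1.length) :
    pvMfull w1 w2 r = pvMpart w1 w2 r 0 := by
  unfold pvMfull pvMpart
  rw [pvProw_zero]
  have h : w1.length - r = (w1.length - r - 1) + 1 := by omega
  conv_lhs => rw [h, List.replicate_succ]

lemma pvMpart_full (w1 w2 : List String) (r : Nat) (hr : r < w1.length) :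
    pvMpart w1 w2 r w2.length = pvMfull w1 w2 (r+1) := by
  unfold pvMpart pvMfull
  rw [pvProw_full, List.range_succ (n := r+1), List.map_append]
  have : w1.length - r - 1 = w1.length - (r+1) := by omega
  simp [this]

-- one step of the inner loop, fully characterised
lemma pv_inner_step (w1 w2 : List String) (i k : Nat) (hi : i < w1.length) (hk : k < w2.length)
    (L : Int) (hL : 0 ≤ L) :
    pvInner w1 w2 i (pvMpart w1 w2 i k, L) k =
      (pvMpart w1 w2 i (k+1), max L (pvD w1 w2 (i+1) (k+1))) := by
  have hv := pvD_succ w1 w2 i k hi hk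
  have hlen : (List.map (pvRowD w1 w2) (List.range (i+1))).length = i + 1 := by simp
  have hread1 : (pvMpart w1 w2 i k).getD i [] = pvRowD w1 w2 i := by
    unfold pvMpart
    rw [pv_getD_append _ _ i (by simp) _]
    exact pv_getD_map_range _ _ _ (by omega) _
  have hread2 : (pvRowD w1 w2 i).getD k 0 = pvD w1 w2 i k :=
    pv_getD_map_range _ _ _ (by omega) _
  have hrow : (pvMpart w1 w2 i k).getD (i+1) [] = pvProw w1 w2 i k := by
    unfold pvMpart
    exact pv_getD_append_at _ _ _ _ _ hlen.symm
  have hsetrow : (pvProw w1 w2 i k).set (k+1) (pvD w1 w2 (i+1) (k+1)) = pvProw w1 w2 i (k+1) := by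
    unfold pvProw
    rw [pv_set_map_range]
    apply List.map_congr_left
    intro j hj
    simp only [List.mem_range] at hj
    by_cases h : j = k + 1
    · subst h; rw [if_pos rfl, if_pos ⟨by omega, le_refl _⟩]
    · rw [if_neg h]
      by_cases h2 : 1 ≤ j ∧ j ≤ k
      · rw [if_pos h2, if_pos ⟨h2.1, by omega⟩]
      · rw [if_neg h2, if_neg (by omega)]
  have hsetmat : (pvMpart w1 w2 i k).set (i+1) (pvProw w1 w2 i (k+1)) = pvMpart w1 w2 i (k+1) := by
    unfold pvMpart
    exact pv_set_append_at _ _ _ _ _ hlen.symm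
  unfold pvInner
  by_cases hc : (w1.getD i "" == w2.getD k "") = true
  · rw [if_pos hc] at hv ⊢
    dsimp only
    rw [hread1, hread2, hrow, ← hv, hsetrow, hsetmat]
  · rw [if_neg hc] at hv ⊢
    dsimp only
    rw [hrow, show (0:Int) = pvD w1 w2 (i+1) (k+1) from hv.symm, hsetrow, hsetmat, hv]
    rw [max_eq_left hL]

lemma pv_foldl_max_le (f : Nat → Int) (l : List Nat) : ∀ L : Int,
    L ≤ l.foldl (fun a j => max a (f j)) L := by
  induction l with
  | nil => intro L; simp
  | cons x xs ih => intro L; exact le_trans (le_max_left _ _) (ih _)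

lemma pv_foldl_le (g : Int → Nat → Int) (h : ∀ L j, L ≤ g L j) :
    ∀ (l : List Nat) (L : Int), L ≤ l.foldl g L := by
  intro l
  induction l with
  | nil => intro L; simp
  | cons x xs ih => intro L; exact le_trans (h L x) (ih _)

-- the whole inner loop, by induction on the number of iterations
lemma pv_inner_inv (w1 w2 : List String) (i : Nat) (hi : i < w1.length) :
    ∀ k, k ≤ w2.length → ∀ L : Int, 0 ≤ L →
    (List.range k).foldl (pvInner w1 w2 i) (pvMpart w1 w2 i 0, L) =
      (pvMpart w1 w2 i k, (List.range k).foldl (fun l j => max l (pvD w1 w2 (i+1) (j+1))) L) := by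
  intro k
  induction k with
  | zero => intro _ L _; simp
  | succ k ih =>
    intro hk L hL
    rw [List.range_succ, List.foldl_append, List.foldl_append, ih (by omega) L hL]
    simp only [List.foldl_cons, List.foldl_nil]
    exact pv_inner_step w1 w2 i k hi (by omega) _ (le_trans hL (pv_foldl_max_le _ _ _))

-- the whole outer loop: the dp matrix is fully determined and longest_len is a double max-fold of pvD
lemma pv_outer_inv (w1 w2 : List String) :
    ∀ r, r ≤ w1.length →
    (List.range r).foldl (pvOuter w1 w2) (pvMfull w1 w2 0, 0) =
      (pvMfull w1 w2 r,
       (List.range r).foldl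
         (fun L i => (List.range w2.length).foldl (fun l j => max l (pvD w1 w2 (i+1) (j+1))) L) 0) := by
  intro r
  induction r with
  | zero => simp
  | succ r ih =>
    intro hr
    rw [List.range_succ, List.foldl_append, List.foldl_append, ih (by omega)]
    simp only [List.foldl_cons, List.foldl_nil]
    have h0 : (0:Int) ≤ (List.range r).foldl
        (fun L i => (List.range w2.length).foldl (fun l j => max l (pvD w1 w2 (i+1) (j+1))) L) 0 :=
      pv_foldl_le _ (fun L j => pv_foldl_max_le _ _ L) _ 0
    unfold pvOuter
    rw [pvMfull_eq_Mpart w1 w2 r (by omega),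
      pv_inner_inv w1 w2 r (by omega) w2.length (le_refl _) _ h0,
      pvMpart_full w1 w2 r (by omega)]

lemma pvRowD_zero (w1 w2 : List String) : pvRowD w1 w2 0 = pvZrow w2 := by
  unfold pvRowD pvZrow
  rw [List.eq_replicate_iff]
  refine ⟨by simp, ?_⟩
  intro b hb
  simp only [List.mem_map] at hb
  obtain ⟨j, _, rfl⟩ := hb
  exact pvD_zero_left w1 w2 j

lemma pvMfull_zero (w1 w2 : List String) :
    pvMfull w1 w2 0 = List.replicate (w1.length + 1) (List.replicate (w2.length + 1) (0 : Int)) := by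
  unfold pvMfull
  rw [show List.range 1 = [0] from rfl]
  simp only [List.map_cons, List.map_nil, pvRowD_zero]
  rw [List.singleton_append, Nat.sub_zero]
  show pvZrow w2 :: List.replicate w1.length (pvZrow w2) = _
  rw [← List.replicate_succ]
  rfl

lemma pv_max_if (l x : Int) : max l x = if l < x then x else l := by
  by_cases h : l < x
  · rw [if_pos h, max_eq_right h.le]
  · rw [if_neg h, max_eq_left (not_lt.mp h)]

-- A's streak equals B's streak
lemma pv_streak_eq (target s : String) :
    find_longest_common_streak target s = pvStreak (PySem.Str.split₀ target) s := by
  unfold find_longest_common_streak pvStreak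
  dsimp only
  rw [← pvMfull_zero, pv_outer_inv _ _ _ (le_refl _)]
  dsimp only
  apply List.foldl_ext
  intro L i _
  apply List.foldl_ext
  intro l j _
  rw [pv_max_if]
  rfl

lemma pv_streak_nonneg (tw : List String) (s : String) : 0 ≤ pvStreak tw s := by
  unfold pvStreak
  dsimp only
  apply pv_foldl_le
  intro L i
  apply pv_foldl_le
  intro l j
  split
  · omega
  · exact le_refl _

-- A's argmax loop started after its first element equals B's max(key=...) fold
lemma pv_fold_eq (target : String) (xs : List String) :
    ∀ b : String,
    xs.foldl (pvBest target) (pvStreak (PySem.Str.split₀ target) b, some b) =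
      (pvStreak (PySem.Str.split₀ target) (xs.foldl (pvMaxKey (PySem.Str.split₀ target)) b),
       some (xs.foldl (pvMaxKey (PySem.Str.split₀ target)) b)) := by
  induction xs with
  | nil => intro b; rfl
  | cons x l ih =>
    intro b
    have hstep : pvBest target (pvStreak (PySem.Str.split₀ target) b, some b) x =
        (pvStreak (PySem.Str.split₀ target) (pvMaxKey (PySem.Str.split₀ target) b x),
         some (pvMaxKey (PySem.Str.split₀ target) b x)) := by
      simp only [pvBest, pvMaxKey, pv_streak_eq]
      split <;> rfl
    simp only [List.foldl_cons, hstep, ih]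

-- ===== VERDICT (by name: the statement is the Claim_ definition above) =====
theorem find_closest_string_spec : Claim_equal_find_closest_string := by
  intro target string_list _
  unfold Spec_find_closest_string
  cases string_list with
  | nil => rfl
  | cons x xs =>
    simp only [find_closest_string, find_closest_string_alt, List.foldl_cons]
    have h1 : pvBest target (-1, none) x =
        (pvStreak (PySem.Str.split₀ target) x, some x) := by
      simp only [pvBest, pv_streak_eq]
      have := pv_streak_nonneg (PySem.Str.split₀ target) x
      rw [if_pos (by omega)]
    rw [h1, pv_fold_eq]
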